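-- pv_equiv track=rewrite | github.com/gkatldus1/Python_algorithm | getNearest.py | getNearestInternal
-- ===== SOURCE A (Python) =====
-- def getNearestInternal(data, m) :
--
--     if len(data) == 1 :
--         return (data[0], data[0])
--     elif len(data) == 2 :
--         return (data[0], data[1])
--
--     mid = len(data) // 2
--
--     if data[mid] <= m :
--         return getNearestInternal(data[mid:], m)
--     else :
--         return getNearestInternal(data[:mid+1], m)
--
--
--     return (0, 0)
-- ===== SOURCE B (Python) =====
-- def getNearestInternal(data, m):
--     # Iterative index-based binary search: no slice copies, no recursion.
--     lo, hi = 0, len(data) - 1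
--     while hi - lo >= 2:
--         mid = lo + (hi - lo + 1) // 2
--         if data[mid] <= m:
--             lo = mid
--         else:
--             hi = mid
--     return (data[lo], data[hi])
-- ===== Notes on version B (the rewrite author's own statement) =====
-- stated objective: alternative
-- what changed: Replaces A's recursion that copies a list slice at every step by an iterative two-index binary search over the original list (no copies, no recursion); intended as faster but measured only ~1.3x at the largest size, so no speed claim.
import Mathlib
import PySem

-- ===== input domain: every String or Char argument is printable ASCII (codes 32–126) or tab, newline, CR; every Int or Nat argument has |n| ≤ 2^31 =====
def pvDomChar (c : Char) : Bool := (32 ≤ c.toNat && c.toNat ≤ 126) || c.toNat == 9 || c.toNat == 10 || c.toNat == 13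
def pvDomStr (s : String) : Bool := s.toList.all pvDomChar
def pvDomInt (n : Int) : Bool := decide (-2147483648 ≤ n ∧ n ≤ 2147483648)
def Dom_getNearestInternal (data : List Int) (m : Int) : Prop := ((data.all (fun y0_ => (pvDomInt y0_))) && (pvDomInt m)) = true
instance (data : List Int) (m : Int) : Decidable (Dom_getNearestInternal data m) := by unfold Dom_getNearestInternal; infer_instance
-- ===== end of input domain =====

-- B replaces A's slice-copying recursion by an iterative two-index binary search over the original list (no copies, no recursion).
-- Return value only; neither version mutates its argument.

-- ===== PORT A =====
-- literal transliteration of A; the `data.length = 0` guard marks Python's IndexError (excluded by Pre_)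
def getNearestInternal (data : List Int) (m : Int) : Int × Int :=
  if data.length = 1 then
    (PySem.List.pyGetD data 0 0, PySem.List.pyGetD data 0 0)
  else if data.length = 2 then
    (PySem.List.pyGetD data 0 0, PySem.List.pyGetD data 1 0)
  else if data.length = 0 then (0, 0)  -- Python raises IndexError here; outside Pre_
  else
    let mid : Int := PySem.Int.floordiv (PySem.List.len data) 2
    if PySem.List.pyGetD data mid 0 ≤ m then
      getNearestInternal (PySem.List.slice data (some mid) none) m
    else
      getNearestInternal (PySem.List.slice data none (some (mid + 1))) m
termination_by data.length
decreasing_by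
  · have h0 : (0:Int) ≤ PySem.Int.floordiv (PySem.List.len data) 2 := by
      simp only [PySem.List.len_eq, PySem.Int.floordiv_eq_ediv_of_pos (b := 2) (by norm_num)]
      exact Int.ediv_nonneg (by positivity) (by norm_num)
    rw [PySem.List.slice_from data h0]
    simp only [PySem.List.len_eq, PySem.Int.floordiv_eq_ediv_of_pos (b := 2) (by norm_num),
      List.length_drop]
    omega
  · have h0 : (0:Int) ≤ PySem.Int.floordiv (PySem.List.len data) 2 + 1 := by
      simp only [PySem.List.len_eq, PySem.Int.floordiv_eq_ediv_of_pos (b := 2) (by norm_num)]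
      have := Int.ediv_nonneg (a := (data.length : Int)) (by positivity) (by norm_num : (0:Int) ≤ 2)
      omega
    rw [PySem.List.slice_to data h0]
    simp only [PySem.List.len_eq, PySem.Int.floordiv_eq_ediv_of_pos (b := 2) (by norm_num),
      List.length_take]
    omega

-- ===== PORT B =====
-- B-side loop: `while hi - lo >= 2` from Source B, indices instead of slices
def pvAltLoop (data : List Int) (m : Int) (lo hi : Int) : Int × Int :=
  if 2 ≤ hi - lo then
    let mid : Int := lo + PySem.Int.floordiv (hi - lo + 1) 2
    if PySem.List.pyGetD data mid 0 ≤ m then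
      pvAltLoop data m mid hi
    else
      pvAltLoop data m lo mid
  else
    (PySem.List.pyGetD data lo 0, PySem.List.pyGetD data hi 0)
termination_by (hi - lo).toNat
decreasing_by
  · simp only [PySem.Int.floordiv_eq_ediv_of_pos (b := 2) (by norm_num)]
    omega
  · simp only [PySem.Int.floordiv_eq_ediv_of_pos (b := 2) (by norm_num)]
    omega

def getNearestInternal_alt (data : List Int) (m : Int) : Int × Int :=
  pvAltLoop data m 0 (PySem.List.len data - 1)

-- ===== PRECONDITION & SPEC =====
-- Pre_ excludes only the empty list, on which Python A raises IndexError (data[0]).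
def Pre_getNearestInternal (data : List Int) (m : Int) : Prop := data ≠ []
instance (data : List Int) (m : Int) : Decidable (Pre_getNearestInternal data m) := by unfold Pre_getNearestInternal; infer_instance
def pvWitness_getNearestInternal : List Int × Int := ([1, 3, 5, 7], 4)

def Spec_getNearestInternal (data : List Int) (m : Int) (out : Int × Int) : Prop := out = getNearestInternal_alt data m
instance (data : List Int) (m : Int) (out : Int × Int) : Decidable (Spec_getNearestInternal data m out) := by unfold Spec_getNearestInternal; infer_instance

-- ===== CLAIM (what is proved, stated in full; the proofs are below) =====
def Claim_equal_getNearestInternal : Prop := ∀ (data : List Int) (m : Int), Dom_getNearestInternal data m → Pre_getNearestInternal data m → Spec_getNearestInternal data m (getNearestInternal data m)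

-- ===== LEMMAS AND PROOFS =====

-- A on the window data[lo..hi] equals B's loop on the indices lo, hi.
-- window of length 1: both sides return (data[hi], data[hi])
theorem pv_base_one (data : List Int) (m : Int) (hi : Nat) (hlt : hi < data.length) :
    getNearestInternal ((data.drop hi).take (hi + 1 - hi)) m = pvAltLoop data m (hi : Int) (hi : Int) := by
  have hx : (data.drop hi).take (hi + 1 - hi) = [data[hi]] := by
    rw [show hi + 1 - hi = 1 by omega]
    rw [List.take_one, List.head?_drop, List.getElem?_eq_getElem hlt]
    rfl
  rw [hx, getNearestInternal, pvAltLoop]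
  rw [if_pos (by rfl : ([data[hi]] : List Int).length = 1),
    if_neg (by omega : ¬ (2:Int) ≤ (hi : Int) - (hi : Int))]
  simp [PySem.List.pyGetD_natCast, List.getD_eq_getElem?_getD, List.getElem?_eq_getElem hlt]

-- window of length 2: both sides return (data[lo], data[lo+1])
theorem pv_base_two (data : List Int) (m : Int) (lo : Nat) (hlt : lo + 1 < data.length) :
    getNearestInternal ((data.drop lo).take (lo + 1 + 1 - lo)) m
      = pvAltLoop data m (lo : Int) ((lo + 1 : Nat) : Int) := by
  have hx : (data.drop lo).take (lo + 1 + 1 - lo) = [data[lo], data[lo + 1]] := by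
    rw [show lo + 1 + 1 - lo = 2 by omega, List.drop_eq_getElem_cons (by omega : lo < data.length),
      List.drop_eq_getElem_cons hlt]
    rfl
  rw [hx, getNearestInternal, pvAltLoop]
  rw [if_neg (by simp : ¬ ([data[lo], data[lo+1]] : List Int).length = 1),
    if_pos (by rfl : ([data[lo], data[lo+1]] : List Int).length = 2),
    if_neg (by push_cast; omega : ¬ (2:Int) ≤ ((lo + 1 : Nat) : Int) - (lo : Int))]
  simp [pysem, List.getD_eq_getElem?_getD,
    List.getElem?_eq_getElem (by omega : lo < data.length)]
  rw [show ((lo:Int)+1) = (((lo+1:Nat)):Int) by push_cast; ring,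
    PySem.List.pyGetD_natCast, List.getD_eq_getElem?_getD, List.getElem?_eq_getElem hlt,
    Option.getD_some]

theorem pv_key (k : Nat) : ∀ (data : List Int) (m : Int) (lo hi : Nat),
    hi - lo ≤ k → lo ≤ hi → hi < data.length →
    getNearestInternal ((data.drop lo).take (hi + 1 - lo)) m = pvAltLoop data m (lo : Int) (hi : Int) := by
  induction k with
  | zero =>
    intro data m lo hi hk hle hlt
    have heq : hi = lo := by omega
    subst heq
    exact pv_base_one data m hi hlt
  | succ k ih =>
    intro data m lo hi hk hle hlt
    set w := (data.drop lo).take (hi + 1 - lo) with hwdef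
    have hw : w.length = hi + 1 - lo := by
      simp [hwdef, List.length_take, List.length_drop]; omega
    by_cases h1 : hi = lo
    · subst h1; exact pv_base_one data m hi hlt
    by_cases h2 : hi = lo + 1
    · subst h2; exact pv_base_two data m lo hlt
    -- main case: window length L = hi + 1 - lo ≥ 3
    set L := hi + 1 - lo with hLdef
    have hL3 : 3 ≤ L := by omega
    set j := L / 2 with hjdef
    have hj1 : 1 ≤ j := by omega
    have hj2 : j ≤ L - 2 := by omega
    have hmid : PySem.Int.floordiv (PySem.List.len w) 2 = ((j : Nat) : Int) := by
      rw [PySem.List.len_eq, hw, hjdef]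
      exact_mod_cast PySem.Int.floordiv_natCast L 2
    have hidx : lo + j < data.length := by omega
    have hgetw : PySem.List.pyGetD w ((j : Nat) : Int) 0 = data[lo + j] := by
      rw [PySem.List.pyGetD_natCast, List.getD_eq_getElem?_getD, List.getElem?_eq_getElem (by omega),
        Option.getD_some]
      simp [hwdef, List.getElem_take, List.getElem_drop]
    have hmidB : (lo : Int) + PySem.Int.floordiv ((hi : Int) - (lo : Int) + 1) 2
        = ((lo + j : Nat) : Int) := by
      have h : (hi : Int) - (lo : Int) + 1 = ((L : Nat) : Int) := by push_cast; omega
      rw [h, show ((2:Int) = ((2:Nat):Int)) by norm_num, PySem.Int.floordiv_natCast]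
      omega
    have hgetB : PySem.List.pyGetD data ((lo + j : Nat) : Int) 0 = data[lo + j] := by
      rw [PySem.List.pyGetD_natCast, List.getD_eq_getElem?_getD,
        List.getElem?_eq_getElem hidx, Option.getD_some]
    rw [getNearestInternal, pvAltLoop]
    rw [if_neg (by omega : ¬ w.length = 1), if_neg (by omega : ¬ w.length = 2),
      if_neg (by omega : ¬ w.length = 0)]
    simp only [hmid, hmidB, hgetw, hgetB]
    rw [if_pos (by omega : (2:Int) ≤ (hi : Int) - (lo : Int))]
    by_cases hc : data[lo + j] ≤ m
    · rw [if_pos hc, if_pos hc]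
      have hslice : PySem.List.slice w (some ((j : Nat) : Int)) none
          = (data.drop (lo + j)).take (hi + 1 - (lo + j)) := by
        rw [PySem.List.slice_from_natCast, hwdef, List.drop_take, List.drop_drop]
        congr 1
        omega
      rw [hslice]
      exact ih data m (lo + j) hi (by omega) (by omega) hlt
    · rw [if_neg hc, if_neg hc]
      have hslice : PySem.List.slice w none (some (((j : Nat) : Int) + 1))
          = (data.drop lo).take ((lo + j) + 1 - lo) := by
        rw [show (((j : Nat) : Int) + 1) = (((j + 1 : Nat)) : Int) by push_cast; ring,
          PySem.List.slice_to_natCast, hwdef, List.take_take]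
        congr 1; omega
      rw [hslice]
      exact ih data m lo (lo + j) (by omega) (by omega) (by omega)

theorem getNearestInternal_spec : Claim_equal_getNearestInternal := by
  intro data m _ hpre
  unfold Spec_getNearestInternal getNearestInternal_alt
  have hlen : 0 < data.length := List.length_pos_of_ne_nil hpre
  have := pv_key data.length data m 0 (data.length - 1) (by omega) (by omega) (by omega)
  simp only [List.drop_zero] at this
  rw [show data.take (data.length - 1 + 1 - 0) = data by simp [Nat.sub_add_cancel hlen]] at this
  rw [this, PySem.List.len_eq]
  congr 1
  omega
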